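-- pv_equiv track=rewrite | github.com/jaronjlee/algorithms | hacker_rank/widest_gap.py | widestGap
-- ===== SOURCE A (Python) =====
-- def widestGap(n, start, finish):
--     intervals = []
--     for i in range(0, len(start)):
--         intervals.append([start[i], finish[i]])
--     intervals.sort()
--     minInterval = min(intervals)
--     mergedIntervals = [minInterval]
--     for interval in intervals[1:]:
--         if interval[0] <= mergedIntervals[-1][1]:
--             mergedIntervals[-1][1] = max(mergedIntervals[-1][1], interval[1])
--         else:
--             mergedIntervals.append(interval)
--     result = 0
--     if mergedIntervals[0][0] > 0:
--         result = mergedIntervals[0][0] - 1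
--     for i in range(0, len(mergedIntervals)-1):
--         result = max(
--             result, mergedIntervals[i+1][0] - mergedIntervals[i][1] - 1)
--     if mergedIntervals[-1][1] < n:
--         result = max(result, n - mergedIntervals[-1][1])
--     return result
-- ===== SOURCE B (Python) =====
-- def widestGap(n, start, finish):
--     # Build the disjoint covered components with a stack, scanning the sorted
--     # intervals in REVERSE: each interval becomes the new leftmost component,
--     # absorbing every existing component it reaches.
--     comps = []  # stack; comps[-1] is the leftmost component (start, end)
--     for s, e in reversed(sorted(zip(start, finish))):
--         end = e
--         while comps and comps[-1][0] <= end: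
--             end = max(end, comps.pop()[1])
--         comps.append((s, end))
--     # sweep the components left to right by popping the stack
--     s0, end = comps.pop()
--     best = s0 - 1 if s0 > 0 else 0
--     while comps:
--         s1, e1 = comps.pop()
--         best = max(best, s1 - end - 1)
--         end = e1
--     if end < n:
--         best = max(best, n - end)
--     return best
-- ===== Notes on version B (the rewrite author's own statement) =====
-- stated objective: alternative
-- what changed: B scans the sorted intervals in REVERSE with a stack of disjoint components (each new interval becomes the leftmost component, popping and absorbing every component it reaches) and then pops the stack left-to-right to take gaps, instead of A's left-to-right merge into a growing mergedIntervals list followed by a separate min() call and an indexed gap scan.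
import Mathlib
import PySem

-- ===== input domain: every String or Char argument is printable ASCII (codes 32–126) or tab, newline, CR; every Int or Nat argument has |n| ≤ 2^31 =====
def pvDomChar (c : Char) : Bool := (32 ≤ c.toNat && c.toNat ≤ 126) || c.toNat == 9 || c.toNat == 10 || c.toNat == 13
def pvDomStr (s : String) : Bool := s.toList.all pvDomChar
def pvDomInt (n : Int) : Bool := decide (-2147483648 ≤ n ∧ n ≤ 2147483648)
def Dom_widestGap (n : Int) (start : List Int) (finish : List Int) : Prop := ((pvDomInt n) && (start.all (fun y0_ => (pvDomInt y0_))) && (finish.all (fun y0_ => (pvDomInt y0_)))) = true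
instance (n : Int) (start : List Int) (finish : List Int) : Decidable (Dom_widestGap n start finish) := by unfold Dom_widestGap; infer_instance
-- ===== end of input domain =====

-- B builds the disjoint covered components with a stack while scanning the SORTED intervals in
-- REVERSE (each interval absorbs the components it reaches), then pops the stack left-to-right
-- for the gaps — instead of A's left-to-right merge list plus a separate indexed gap scan
-- (objective: alternative; same sort-dominated cost).

-- ===== PORT A =====
-- literal port of Source A; Python lists [s, f] are ported as pairs (s, f) (sort/min compare them
-- lexicographically either way); the (0,0)/0 defaults are only hit outside Pre_widestGap.
-- loop body of A's merge loop ('for interval in intervals[1:]')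
def widestGapMergeStep (m : List (Int × Int)) (iv : Int × Int) : List (Int × Int) :=
  match m.getLast? with
  | none => m   -- unreachable: mergedIntervals is never empty
  | some last =>
    if iv.1 ≤ last.2 then m.dropLast ++ [(last.1, max last.2 iv.2)]  -- mergedIntervals[-1][1] = max(...)
    else m ++ [iv]

def widestGap (n : Int) (start : List Int) (finish : List Int) : Int :=
  let intervals : List (Int × Int) :=
    (PySem.List.pyRange 0 (start.length : Int) 1).foldl
      (fun acc i => acc ++ [(PySem.List.pyGetD start i 0, PySem.List.pyGetD finish i 0)]) []
  let sortedIntervals := PySem.List.sorted2 intervals Prod.fst Prod.snd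
  match PySem.List.min2? sortedIntervals Prod.fst Prod.snd with
  | none => 0   -- min([]) raises ValueError in Python; such inputs are outside Pre_widestGap
  | some minInterval =>
    let merged := (sortedIntervals.drop 1).foldl widestGapMergeStep [minInterval]   -- intervals[1:]
    let result0 : Int := if (merged.headD (0,0)).1 > 0 then (merged.headD (0,0)).1 - 1 else 0
    let result1 :=
      (PySem.List.pyRange 0 ((merged.length : Int) - 1) 1).foldl
        (fun r i => max r ((PySem.List.pyGetD merged (i + 1) (0,0)).1 - (PySem.List.pyGetD merged i (0,0)).2 - 1))
        result0
    if (merged.getLastD (0,0)).2 < n then max result1 (n - (merged.getLastD (0,0)).2) else result1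

-- ===== PORT B =====
-- B's inner absorption loop ('while comps and comps[-1][0] <= end: …pop…'); the Nat argument is
-- plain fuel (always called with the stack's length, enough for every pop) making the pop loop
-- structural; it never changes the computed value.
def widestGapAbsorb : Nat → List (Int × Int) → Int → List (Int × Int) × Int
  | 0, comps, e => (comps, e)
  | fuel + 1, comps, e =>
    match comps.getLast? with
    | none => (comps, e)
    | some c => if c.1 ≤ e then widestGapAbsorb fuel comps.dropLast (max e c.2) else (comps, e)

-- body of B's 'for s, e in reversed(sorted(zip(start, finish)))' loop
def widestGapStep (comps : List (Int × Int)) (iv : Int × Int) : List (Int × Int) :=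
  let p := widestGapAbsorb comps.length comps iv.2
  p.1 ++ [(iv.1, p.2)]

-- B's final 'while comps: …pop…' sweep, returning (best, end); fuel as above
def widestGapSweep : Nat → List (Int × Int) → Int → Int → Int × Int
  | 0, _, b, e => (b, e)
  | fuel + 1, comps, b, e =>
    match comps.getLast? with
    | none => (b, e)
    | some c => widestGapSweep fuel comps.dropLast (max b (c.1 - e - 1)) c.2

def widestGap_alt (n : Int) (start : List Int) (finish : List Int) : Int :=
  let ivs := PySem.List.sorted2 (start.zip finish) Prod.fst Prod.snd
  let comps := ivs.reverse.foldl widestGapStep []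
  match comps.getLast? with
  | none => 0   -- comps.pop() raises IndexError in Python; such inputs are outside Pre_widestGap
  | some c0 =>
    let best0 : Int := if c0.1 > 0 then c0.1 - 1 else 0
    let rest := comps.dropLast
    let p := widestGapSweep rest.length rest best0 c0.2
    if p.2 < n then max p.1 (n - p.2) else p.1

-- ===== PRECONDITION & SPEC =====
-- Pre_ excludes exactly the inputs where A raises: empty start (ValueError from min([]))
-- and finish shorter than start (IndexError on finish[i]).
def Pre_widestGap (n : Int) (start : List Int) (finish : List Int) : Prop :=
  start ≠ [] ∧ start.length ≤ finish.length
instance (n : Int) (start : List Int) (finish : List Int) : Decidable (Pre_widestGap n start finish) := by unfold Pre_widestGap; infer_instance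

def pvWitness_widestGap : Int × List Int × List Int := (10, [6, 1], [8, 3])

def Spec_widestGap (n : Int) (start : List Int) (finish : List Int) (out : Int) : Prop := out = widestGap_alt n start finish
instance (n : Int) (start : List Int) (finish : List Int) (out : Int) : Decidable (Spec_widestGap n start finish out) := by unfold Spec_widestGap; infer_instance

-- ===== CLAIM (what is proved, stated in full; the proofs are below) =====
def Claim_equal_widestGap : Prop := ∀ (n : Int) (start : List Int) (finish : List Int), Dom_widestGap n start finish → Pre_widestGap n start finish → Spec_widestGap n start finish (widestGap n start finish)

-- ===== LEMMAS AND PROOFS =====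

-- A's left-to-right merge, written with the running (not-yet-appended) component explicit
def pvMergeFrom : (Int × Int) → List (Int × Int) → List (Int × Int)
  | c, [] => [c]
  | c, iv :: r => if iv.1 ≤ c.2 then pvMergeFrom (c.1, max c.2 iv.2) r else c :: pvMergeFrom iv r

-- merged components of a whole list (empty list: no components)
def pvComps : List (Int × Int) → List (Int × Int)
  | [] => []
  | x :: t => pvMergeFrom x t

-- B's absorption loop on the UNreversed component list (leftmost component first)
def pvAbs : Int → List (Int × Int) → List (Int × Int) × Int
  | e, [] => ([], e)
  | e, c :: C => if c.1 ≤ e then pvAbs (max e c.2) C else (c :: C, e)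

-- B's pop sweep on the UNreversed component list
def pvSweepL : List (Int × Int) → Int → Int → Int × Int
  | [], b, e => (b, e)
  | c :: M, b, e => pvSweepL M (max b (c.1 - e - 1)) c.2

-- the widest internal gap scan of A, as structural recursion over adjacent pairs
def pvGaps : List (Int × Int) → Int → Int
  | a :: b :: t, r => pvGaps (b :: t) (max r (b.1 - a.2 - 1))
  | _, r => r

-- the Bool lexicographic test inside sorted2/min2? is the strict order on Lex (Int × Int)
lemma pvLexBool (a b : Int × Int) :
    (decide (a.1 < b.1) || (!decide (b.1 < a.1) && decide (a.2 < b.2))) = decide (toLex a < toLex b) := by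
  by_cases h1 : a.1 < b.1 <;> by_cases h2 : b.1 < a.1 <;> by_cases h3 : a.2 < b.2 <;>
    simp [h1, h2, h3, Prod.Lex.lt_iff] <;> omega

lemma pvSorted2_eq_sorted_lex (xs : List (Int × Int)) :
    PySem.List.sorted2 xs Prod.fst Prod.snd = PySem.List.sorted xs (fun x => toLex x) := by
  rw [PySem.List.sorted_eq_foldl_insertBy]
  have h : (fun (a b : Int × Int) => (decide (a.1 < b.1) || (!decide (b.1 < a.1) && decide (a.2 < b.2))))
      = fun a b => decide (toLex a < toLex b) := by
    funext a b; exact pvLexBool a b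
  simp [PySem.List.sorted2, h]

lemma pvMin2_drop (h y : Int × Int) (ys : List (Int × Int)) (hy : ¬ toLex y < toLex h) :
    PySem.List.min2? (h :: y :: ys) Prod.fst Prod.snd = PySem.List.min2? (h :: ys) Prod.fst Prod.snd := by
  simp only [PySem.List.min2?, List.foldl_cons]
  congr 1
  show (if (decide (y.1 < h.1) || (!decide (h.1 < y.1) && decide (y.2 < h.2))) = true
        then some y else some h) = some h
  rw [pvLexBool]
  simp [hy]

lemma pvMin2_cons_of_min (h : Int × Int) : ∀ (t : List (Int × Int)),
    (∀ x ∈ t, ¬ toLex x < toLex h) →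
    PySem.List.min2? (h :: t) Prod.fst Prod.snd = some h
  | [], _ => rfl
  | y :: ys, hmin => by
    rw [pvMin2_drop h y ys (hmin y (by simp))]
    exact pvMin2_cons_of_min h ys (fun x hx => hmin x (by simp [hx]))

lemma pvIntervals_eq_zip (start finish : List Int) (hle : start.length ≤ finish.length) :
    (PySem.List.pyRange 0 (start.length : Int) 1).foldl
      (fun acc i => acc ++ [(PySem.List.pyGetD start i 0, PySem.List.pyGetD finish i 0)]) []
    = start.zip finish := by
  rw [PySem.List.foldl_append_singleton_eq_map, PySem.List.pyRange_zero_natCast]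
  simp only [List.map_map, List.nil_append]
  apply List.ext_getElem
  · simp [List.length_zip]; omega
  · intro i h1 h2
    simp only [List.getElem_map, List.getElem_range, Function.comp_apply,
      PySem.List.pyGetD_natCast, List.getElem_zip]
    have hi : i < start.length := by simpa using h1
    rw [List.getD_eq_getElem start 0 hi, List.getD_eq_getElem finish 0 (by omega)]

lemma pvFoldlRange_gaps : ∀ (l : List (Int × Int)) (r : Int),
    (List.range (l.length - 1)).foldl
      (fun r k => max r ((l.getD (k + 1) (0,0)).1 - (l.getD k (0,0)).2 - 1)) r = pvGaps l r
  | [], r => rfl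
  | [a], r => rfl
  | a :: b :: t, r => by
    have hlen : (a :: b :: t).length - 1 = t.length + 1 := by simp
    rw [hlen, List.range_succ_eq_map]
    simp only [List.foldl_cons, List.foldl_map]
    have hstep : pvGaps (a :: b :: t) r = pvGaps (b :: t) (max r (b.1 - a.2 - 1)) := rfl
    rw [hstep, ← pvFoldlRange_gaps (b :: t) (max r (b.1 - a.2 - 1))]
    simp [Nat.succ_eq_add_one]

lemma pvScanA_eq_gaps (l : List (Int × Int)) (hl : l ≠ []) (r : Int) :
    (PySem.List.pyRange 0 ((l.length : Int) - 1) 1).foldl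
      (fun r i => max r ((PySem.List.pyGetD l (i + 1) (0,0)).1 - (PySem.List.pyGetD l i (0,0)).2 - 1)) r
    = pvGaps l r := by
  have h1 : 1 ≤ l.length := List.length_pos_iff.mpr hl
  have hlen : ((l.length : Int) - 1) = ((l.length - 1 : Nat) : Int) := by omega
  rw [hlen, PySem.List.pyRange_zero_natCast, List.foldl_map, ← pvFoldlRange_gaps l r]
  apply PySem.List.foldl_congr_mem
  intro acc k _
  have h2 : ((k : Int) + 1) = ((k + 1 : Nat) : Int) := by push_cast; ring
  rw [h2, PySem.List.pyGetD_natCast, PySem.List.pyGetD_natCast]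

-- A's foldl-merge equals pvMergeFrom of the head component
lemma pvFoldlMerge : ∀ (t acc : List (Int × Int)) (c : Int × Int),
    t.foldl widestGapMergeStep (acc ++ [c]) = acc ++ pvMergeFrom c t
  | [], acc, c => by simp [pvMergeFrom]
  | iv :: t', acc, c => by
    rw [List.foldl_cons]
    have hstep : widestGapMergeStep (acc ++ [c]) iv
        = if iv.1 ≤ c.2 then acc ++ [(c.1, max c.2 iv.2)] else (acc ++ [c]) ++ [iv] := by
      simp [widestGapMergeStep]
    by_cases h : iv.1 ≤ c.2
    · rw [hstep, if_pos h, pvFoldlMerge t' acc (c.1, max c.2 iv.2)]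
      simp [pvMergeFrom, h]
    · rw [hstep, if_neg h, pvFoldlMerge t' (acc ++ [c]) iv]
      simp [pvMergeFrom, h]

-- absorbing with a raised end after a first absorption = absorbing once with the joined end
lemma pvAbsComp : ∀ (C : List (Int × Int)) (e2 e : Int),
    pvAbs (max e (pvAbs e2 C).2) (pvAbs e2 C).1 = pvAbs (max e e2) C
  | [], e2, e => rfl
  | c :: C', e2, e => by
    by_cases h : c.1 ≤ e2
    · have h' : c.1 ≤ max e e2 := le_trans h (le_max_right e e2)
      simp only [pvAbs, if_pos h, if_pos h', pvAbsComp C' (max e2 c.2) e]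
      rw [max_assoc]
    · have h' : pvAbs e2 (c :: C') = (c :: C', e2) := by simp [pvAbs, h]
      rw [h']

-- CORE: prepending an interval to a component list (B's stack step, unreversed)
-- equals A's element-wise merge from that interval
lemma pvCore : ∀ (t : List (Int × Int)) (c : Int × Int),
    pvMergeFrom c t = (c.1, (pvAbs c.2 (pvComps t)).2) :: (pvAbs c.2 (pvComps t)).1 := by
  intro t
  induction t with
  | nil => intro c; simp [pvMergeFrom, pvComps, pvAbs]
  | cons iv r ih =>
    intro c
    have hr : pvComps (iv :: r) = (iv.1, (pvAbs iv.2 (pvComps r)).2) :: (pvAbs iv.2 (pvComps r)).1 := by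
      simpa [pvComps] using ih iv
    by_cases h : iv.1 ≤ c.2
    · have hL : pvMergeFrom c (iv :: r) = pvMergeFrom (c.1, max c.2 iv.2) r := by
        simp [pvMergeFrom, h]
      rw [hL, ih (c.1, max c.2 iv.2), hr]
      simp only [pvAbs, if_pos h]
      rw [pvAbsComp (pvComps r) iv.2 c.2]
    · have hL : pvMergeFrom c (iv :: r) = c :: pvMergeFrom iv r := by
        simp [pvMergeFrom, h]
      rw [hL, hr, ih iv]
      simp [pvAbs, h]

-- B's fueled pop loop on a reversed list computes pvAbs on the original list
lemma pvRevAbs : ∀ (C : List (Int × Int)) (e : Int),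
    widestGapAbsorb C.length C.reverse e = ((pvAbs e C).1.reverse, (pvAbs e C).2)
  | [], e => rfl
  | c :: C', e => by
    simp only [List.length_cons, List.reverse_cons, widestGapAbsorb,
      List.getLast?_concat, List.dropLast_concat]
    by_cases h : c.1 ≤ e
    · rw [if_pos h, pvRevAbs C' (max e c.2)]
      simp [pvAbs, h]
    · rw [if_neg h]
      simp [pvAbs, h]

-- B's first loop (a foldr after reversing) builds the reversed component list
lemma pvFoldrComps : ∀ (l : List (Int × Int)),
    l.foldr (fun x C => widestGapStep C x) [] = (pvComps l).reverse
  | [] => rfl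
  | x :: t => by
    rw [List.foldr_cons, pvFoldrComps t]
    show widestGapStep (pvComps t).reverse x = (pvComps (x :: t)).reverse
    simp only [widestGapStep, List.length_reverse]
    rw [pvRevAbs (pvComps t) x.2]
    show (pvAbs x.2 (pvComps t)).1.reverse ++ [(x.1, (pvAbs x.2 (pvComps t)).2)]
        = (pvComps (x :: t)).reverse
    rw [← List.reverse_cons]
    have : pvComps (x :: t) = pvMergeFrom x t := rfl
    rw [this, pvCore t x]

-- B's fueled pop sweep on a reversed list computes pvSweepL on the original list
lemma pvRevSweep : ∀ (M : List (Int × Int)) (b e : Int),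
    widestGapSweep M.length M.reverse b e = pvSweepL M b e
  | [], b, e => rfl
  | c :: M', b, e => by
    simp only [List.length_cons, List.reverse_cons, widestGapSweep,
      List.getLast?_concat, List.dropLast_concat]
    rw [pvRevSweep M' (max b (c.1 - e - 1)) c.2]
    rfl

-- the pop sweep computes A's adjacent-gap scan and the last component's end
lemma pvSweepGaps : ∀ (M : List (Int × Int)) (prev : Int × Int) (b : Int),
    pvSweepL M b prev.2 = (pvGaps (prev :: M) b, ((prev :: M).getLastD (0,0)).2)
  | [], prev, b => rfl
  | c :: M', prev, b => by
    show pvSweepL M' (max b (c.1 - prev.2 - 1)) c.2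
        = (pvGaps (prev :: c :: M') b, ((prev :: c :: M').getLastD (0,0)).2)
    rw [pvSweepGaps M' c (max b (c.1 - prev.2 - 1))]
    rfl

-- ===== VERDICT (by name: the statement is the Claim_ definition above) =====
theorem widestGap_spec : Claim_equal_widestGap := by
  intro n start finish _ hPre
  obtain ⟨hne, hle⟩ := hPre
  have hzip : start.zip finish ≠ [] := by
    cases start with
    | nil => exact absurd rfl hne
    | cons s st =>
      cases finish with
      | nil => simp at hle
      | cons f ft => simp
  have hLne : PySem.List.sorted2 (start.zip finish) Prod.fst Prod.snd ≠ [] := by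
    rw [pvSorted2_eq_sorted_lex]
    simpa [PySem.List.sorted_eq_nil_iff] using hzip
  obtain ⟨h, t, hLcons⟩ : ∃ h t, PySem.List.sorted2 (start.zip finish) Prod.fst Prod.snd = h :: t := by
    cases hL : PySem.List.sorted2 (start.zip finish) Prod.fst Prod.snd with
    | nil => exact absurd hL hLne
    | cons h t => exact ⟨h, t, rfl⟩
  obtain ⟨s0, e0⟩ := h
  have hpair : List.Pairwise (fun a b : Int × Int => toLex a ≤ toLex b)
      (PySem.List.sorted2 (start.zip finish) Prod.fst Prod.snd) := by
    rw [pvSorted2_eq_sorted_lex]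
    exact PySem.List.sorted_pairwise _ _
  rw [hLcons] at hpair
  have hminlt : ∀ x ∈ t, ¬ toLex x < toLex ((s0, e0) : Int × Int) := by
    intro x hx
    exact not_lt.mpr ((List.pairwise_cons.mp hpair).1 x hx)
  have hmin2 : PySem.List.min2? (PySem.List.sorted2 (start.zip finish) Prod.fst Prod.snd)
      Prod.fst Prod.snd = some (s0, e0) := by
    rw [hLcons]
    exact pvMin2_cons_of_min (s0, e0) t hminlt
  unfold Spec_widestGap widestGap widestGap_alt
  rw [pvIntervals_eq_zip start finish hle]
  dsimp only
  rw [hmin2, hLcons]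
  dsimp only
  -- A's merged list
  simp only [List.drop_succ_cons, List.drop_zero]
  have hmerged : t.foldl widestGapMergeStep [((s0, e0) : Int × Int)]
      = pvMergeFrom (s0, e0) t := by
    simpa using pvFoldlMerge t [] (s0, e0)
  rw [hmerged]
  -- B's component stack
  rw [List.foldl_reverse, pvFoldrComps ((s0, e0) :: t)]
  have hM : pvComps ((s0, e0) :: t)
      = (s0, (pvAbs e0 (pvComps t)).2) :: (pvAbs e0 (pvComps t)).1 := by
    show pvMergeFrom (s0, e0) t = _
    exact pvCore t (s0, e0)
  set A1 := (pvAbs e0 (pvComps t)).1 with hA1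
  set A2 := (pvAbs e0 (pvComps t)).2 with hA2
  rw [hM]
  set M := pvMergeFrom (s0, e0) t with hMdef
  have hMc : M = (s0, A2) :: A1 := by rw [hMdef]; exact pvCore t (s0, e0)
  -- B's head component and sweep
  simp only [List.reverse_cons, List.getLast?_concat, List.dropLast_concat, List.length_reverse]
  rw [pvRevSweep A1 (if (s0 : Int) > 0 then s0 - 1 else 0) A2]
  have hsweep := pvSweepGaps A1 ((s0, A2) : Int × Int) (if (s0 : Int) > 0 then s0 - 1 else 0)
  rw [hsweep]
  -- A's pieces on M
  rw [hMc]
  have hhead : (((s0, A2) :: A1).headD (0,0)).1 = s0 := rfl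
  rw [pvScanA_eq_gaps ((s0, A2) :: A1) (by simp) _]
  rfl
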